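-- pv_equiv track=rewrite | github.com/rohitg00/ai-engineering-from-scratch | phases/10-llms-from-scratch/03-data-pipelines/code/main.py | pack_sequences
-- ===== SOURCE A (Python) =====
-- def pack_sequences(token_ids, seq_length, pad_id=0):
--     sequences = []
--     attention_masks = []
--     for i in range(0, len(token_ids), seq_length):
--         seq = token_ids[i:i + seq_length]
--         mask = [1] * len(seq)
--         if len(seq) < seq_length:
--             pad_count = seq_length - len(seq)
--             seq = seq + [pad_id] * pad_count
--             mask = mask + [0] * pad_count
--         sequences.append(seq)
--         attention_masks.append(mask)
--     return sequences, attention_masks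
-- ===== SOURCE B (Python) =====
-- def pack_sequences(token_ids, seq_length, pad_id=0):
--     n = len(token_ids)
--     starts = range(0, n, seq_length)
--     total = len(starts) * seq_length
--     padded = list(token_ids) + [pad_id] * (total - n)
--     full_mask = [1] * n + [0] * (total - n)
--     sequences = [padded[i:i + seq_length] for i in starts]
--     attention_masks = [full_mask[i:i + seq_length] for i in starts]
--     return sequences, attention_masks
-- ===== Notes on version B (the rewrite author's own statement) =====
-- stated objective: alternative
-- what changed: Instead of padding each window and building its mask inside the loop, B materialises the whole padded token list and the full attention mask once and then reshapes both into seq_length-sized chunks by slicing in a comprehension.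
import Mathlib
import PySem

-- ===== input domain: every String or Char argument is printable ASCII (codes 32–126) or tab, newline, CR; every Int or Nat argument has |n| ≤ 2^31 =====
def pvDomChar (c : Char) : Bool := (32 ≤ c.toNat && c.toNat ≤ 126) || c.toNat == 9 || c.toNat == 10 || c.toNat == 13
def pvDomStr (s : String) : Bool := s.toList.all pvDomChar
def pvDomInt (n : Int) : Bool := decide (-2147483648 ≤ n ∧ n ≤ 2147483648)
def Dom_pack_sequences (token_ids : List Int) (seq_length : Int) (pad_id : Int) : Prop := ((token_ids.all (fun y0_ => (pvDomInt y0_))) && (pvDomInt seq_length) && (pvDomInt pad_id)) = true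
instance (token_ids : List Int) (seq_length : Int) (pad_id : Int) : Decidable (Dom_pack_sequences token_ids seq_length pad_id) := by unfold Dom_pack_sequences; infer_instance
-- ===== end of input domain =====

-- B materialises the whole padded token list and full attention mask once and reshapes
-- them by slicing, instead of A's per-window pad-and-mask construction (objective: alternative).

-- ===== PORT A =====
-- literal transliteration of A: loop over range(0, len, seq_length), per window slice,
-- pad the short tail window and its mask, append both.
def pack_sequences (token_ids : List Int) (seq_length : Int) (pad_id : Int) : List (List Int) × List (List Int) :=
  (PySem.List.pyRange 0 (token_ids.length : Int) seq_length).foldl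
    (fun acc i =>
      let seq := PySem.List.slice token_ids (some i) (some (i + seq_length))
      let mask := List.replicate seq.length (1 : Int)
      if (seq.length : Int) < seq_length then
        let pad_count := seq_length - (seq.length : Int)
        -- Python's `[x] * k` yields [] for k < 0; `.toNat` clamps the same way
        (acc.1 ++ [seq ++ List.replicate pad_count.toNat pad_id],
         acc.2 ++ [mask ++ List.replicate pad_count.toNat (0 : Int)])
      else
        (acc.1 ++ [seq], acc.2 ++ [mask]))
    ([], [])

-- ===== PORT B =====
-- literal transliteration of Source B: build padded tokens and the full mask once, then slice.
def pack_sequences_alt (token_ids : List Int) (seq_length : Int) (pad_id : Int) : List (List Int) × List (List Int) :=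
  let n : Int := token_ids.length
  let starts := PySem.List.pyRange 0 n seq_length
  let total : Int := (starts.length : Int) * seq_length
  -- Python's `[x] * k` yields [] for k < 0; `.toNat` clamps the same way
  let padded := token_ids ++ List.replicate (total - n).toNat pad_id
  let full_mask := List.replicate token_ids.length (1 : Int) ++ List.replicate (total - n).toNat (0 : Int)
  (starts.map (fun i => PySem.List.slice padded (some i) (some (i + seq_length))),
   starts.map (fun i => PySem.List.slice full_mask (some i) (some (i + seq_length))))

-- ===== PRECONDITION & SPEC =====
-- Pre_ excludes only seq_length = 0, where Python's range(0, n, 0) raises ValueError in A (and in B).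
def Pre_pack_sequences (token_ids : List Int) (seq_length : Int) (pad_id : Int) : Prop := seq_length ≠ 0
instance (token_ids : List Int) (seq_length : Int) (pad_id : Int) : Decidable (Pre_pack_sequences token_ids seq_length pad_id) := by unfold Pre_pack_sequences; infer_instance

def pvWitness_pack_sequences : List Int × Int × Int := ([5, 6, 7, 8, 9], 2, 0)

def Spec_pack_sequences (token_ids : List Int) (seq_length : Int) (pad_id : Int) (out : List (List Int) × List (List Int)) : Prop := out = pack_sequences_alt token_ids seq_length pad_id
instance (token_ids : List Int) (seq_length : Int) (pad_id : Int) (out : List (List Int) × List (List Int)) : Decidable (Spec_pack_sequences token_ids seq_length pad_id out) := by unfold Spec_pack_sequences; infer_instance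

-- ===== CLAIM (what is proved, stated in full; the proofs are below) =====
def Claim_equal_pack_sequences : Prop := ∀ (token_ids : List Int) (seq_length : Int) (pad_id : Int), Dom_pack_sequences token_ids seq_length pad_id → Pre_pack_sequences token_ids seq_length pad_id → Spec_pack_sequences token_ids seq_length pad_id (pack_sequences token_ids seq_length pad_id)

-- ===== LEMMAS AND PROOFS =====

-- the per-window sequence A produces (body of A's loop, sequence part)
def seqA (t : List Int) (s pd : Int) (i : Int) : List Int :=
  let seq := PySem.List.slice t (some i) (some (i + s))
  if (seq.length : Int) < s then seq ++ List.replicate (s - (seq.length : Int)).toNat pd else seq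

-- the per-window mask A produces (body of A's loop, mask part)
def maskA (t : List Int) (s : Int) (i : Int) : List Int :=
  let seq := PySem.List.slice t (some i) (some (i + s))
  let mask := List.replicate seq.length (1 : Int)
  if (seq.length : Int) < s then mask ++ List.replicate (s - (seq.length : Int)).toNat (0 : Int) else mask

lemma packA_eq_maps (t : List Int) (s pd : Int) :
    pack_sequences t s pd =
      ((PySem.List.pyRange 0 (t.length : Int) s).map (seqA t s pd),
       (PySem.List.pyRange 0 (t.length : Int) s).map (maskA t s)) := by
  unfold pack_sequences
  have hbody : (fun (acc : List (List Int) × List (List Int)) (i : Int) =>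
      let seq := PySem.List.slice t (some i) (some (i + s))
      let mask := List.replicate seq.length (1 : Int)
      if (seq.length : Int) < s then
        let pad_count := s - (seq.length : Int)
        (acc.1 ++ [seq ++ List.replicate pad_count.toNat pd],
         acc.2 ++ [mask ++ List.replicate pad_count.toNat (0 : Int)])
      else
        (acc.1 ++ [seq], acc.2 ++ [mask]))
      = (fun acc i => (acc.1 ++ [seqA t s pd i], acc.2 ++ [maskA t s i])) := by
    funext acc i
    simp only [seqA, maskA]
    split <;> rfl
  rw [hbody, PySem.List.foldl_prod_mk (fun l i => l ++ [seqA t s pd i]) (fun l i => l ++ [maskA t s i]),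
      PySem.List.foldl_append_singleton_eq_map, PySem.List.foldl_append_singleton_eq_map]
  simp

-- for a negative step and nonnegative stop, range(0, n, s) is empty
lemma pyRange_neg_nil (n s : Int) (hn : 0 ≤ n) (hs : s < 0) :
    PySem.List.pyRange 0 n s = [] := by
  simp only [PySem.List.pyRange]
  rw [if_neg (by omega)]
  rw [if_neg (by omega), if_neg (by omega)]
  simp

-- the padded total length covers the tokens: n ≤ len(range(0,n,s)) * s for s > 0
lemma total_ge (n s : Int) (hs : 0 < s) (hn : 0 ≤ n) :
    n ≤ ((PySem.List.pyRange 0 n s).length : Int) * s := by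
  rw [PySem.List.pyRange_of_pos 0 n hs]
  simp only [List.length_map, List.length_range]
  by_cases h : (0 : Int) < n
  · rw [if_pos h]
    have hq : 0 ≤ (n - 0 + s - 1) / s := by
      apply Int.ediv_nonneg <;> omega
    rw [Int.toNat_of_nonneg hq]
    have hdm := Int.mul_ediv_add_emod (n - 0 + s - 1) s
    have hr1 := Int.emod_nonneg (n - 0 + s - 1) (by omega : s ≠ 0)
    have hr2 := Int.emod_lt_of_pos (n - 0 + s - 1) hs
    nlinarith [hdm, hr1, hr2]
  · rw [if_neg h]
    simp
    omega

-- every window start leaves room for a full window inside the padded total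
lemma start_window_le (n s i : Int) (hs : 0 < s) (hn : 0 ≤ n)
    (h0 : 0 ≤ i) (hin : i < n) (hdvd : s ∣ i) :
    i + s ≤ ((PySem.List.pyRange 0 n s).length : Int) * s := by
  obtain ⟨k, hk⟩ := hdvd
  have hk0 : 0 ≤ k := by nlinarith
  have htot := total_ge n s hs hn
  set L : Int := ((PySem.List.pyRange 0 n s).length : Int) with hL
  have hkL : k < L := by nlinarith
  nlinarith

-- slicing a window out of ys ++ replicate p a = the window of ys plus the missing padding
lemma take_drop_append_replicate {α : Type} (ys : List α) (a : α) (i s p : Nat)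
    (hi : i ≤ ys.length) (h : s ≤ (ys.length - i) + p) :
    List.take s ((ys ++ List.replicate p a).drop i)
      = List.take s (ys.drop i) ++ List.replicate (s - (ys.length - i)) a := by
  rw [List.drop_append]
  have h0 : i - ys.length = 0 := by omega
  rw [h0, List.drop_zero, List.take_append, List.take_replicate]
  congr 2
  rw [List.length_drop]
  omega

-- B's token window equals A's padded window
lemma seq_elem (t : List Int) (s pd : Int) (p : Nat) (hs : 0 < s) (i : Int)
    (h0 : 0 ≤ i) (hin : i < (t.length : Int)) (hle : i + s ≤ (t.length : Int) + p) :
    PySem.List.slice (t ++ List.replicate p pd) (some i) (some (i + s)) = seqA t s pd i := by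
  have hs0 : (0 : Int) ≤ i + s := by omega
  rw [PySem.List.slice_toNat _ h0 hs0]
  unfold seqA
  rw [PySem.List.slice_toNat _ h0 hs0]
  have hts : (i + s).toNat - i.toNat = s.toNat := by omega
  rw [hts]
  set i' := i.toNat with hi'
  set s' := s.toNat with hs'
  have hi'n : i' < t.length := by omega
  have hlen : (List.take s' (t.drop i')).length = min s' (t.length - i') := by
    simp [List.length_take, List.length_drop]
  rw [take_drop_append_replicate t pd i' s' p (by omega) (by omega)]
  by_cases hc : ((List.take s' (t.drop i')).length : Int) < s
  · rw [if_pos hc]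
    congr 2
    rw [hlen] at hc ⊢
    omega
  · rw [if_neg hc]
    rw [hlen] at hc
    have : s' - (t.length - i') = 0 := by omega
    rw [this]
    simp

-- B's mask window equals A's padded mask
lemma mask_elem (t : List Int) (s : Int) (p : Nat) (hs : 0 < s) (i : Int)
    (h0 : 0 ≤ i) (hin : i < (t.length : Int)) (hle : i + s ≤ (t.length : Int) + p) :
    PySem.List.slice (List.replicate t.length (1 : Int) ++ List.replicate p (0 : Int))
        (some i) (some (i + s)) = maskA t s i := by
  have hs0 : (0 : Int) ≤ i + s := by omega
  rw [PySem.List.slice_toNat _ h0 hs0]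
  unfold maskA
  rw [PySem.List.slice_toNat _ h0 hs0]
  have hts : (i + s).toNat - i.toNat = s.toNat := by omega
  rw [hts]
  set i' := i.toNat with hi'
  set s' := s.toNat with hs'
  have hi'n : i' < t.length := by omega
  have hlen : (List.take s' (t.drop i')).length = min s' (t.length - i') := by
    simp [List.length_take, List.length_drop]
  rw [take_drop_append_replicate (List.replicate t.length (1 : Int)) (0 : Int) i' s' p
        (by simp; omega) (by simp; omega)]
  rw [List.drop_replicate, List.take_replicate, List.length_replicate]
  by_cases hc : ((List.take s' (t.drop i')).length : Int) < s
  · rw [if_pos hc, hlen]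
    rw [hlen] at hc
    congr 2
    omega
  · rw [if_neg hc]
    rw [hlen] at hc
    have h1 : min s' (t.length - i') = s' := by omega
    have h2 : s' - (t.length - i') = 0 := by omega
    rw [h2, hlen, h1]
    simp

lemma main_pos (t : List Int) (s pd : Int) (hs : 0 < s) :
    pack_sequences t s pd = pack_sequences_alt t s pd := by
  rw [packA_eq_maps]
  unfold pack_sequences_alt
  simp only []
  set n : Int := (t.length : Int) with hn
  have hn0 : 0 ≤ n := by positivity
  set L : Int := ((PySem.List.pyRange 0 n s).length : Int) with hL
  have htot : n ≤ L * s := total_ge n s hs hn0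
  have hp : ((L * s - n).toNat : Int) = L * s - n := Int.toNat_of_nonneg (by omega)
  rw [Prod.mk.injEq]
  refine ⟨?_, ?_⟩ <;>
  · apply List.map_congr_left
    intro i hi
    rw [PySem.List.mem_pyRange_iff_of_pos hs] at hi
    obtain ⟨h0, hin, hdvd⟩ := hi
    rw [sub_zero] at hdvd
    have hwin : i + s ≤ n + (L * s - n).toNat := by
      have hw := start_window_le n s i hs hn0 h0 hin hdvd
      rw [← hL] at hw
      omega
    first
      | exact (seq_elem t s pd (L * s - n).toNat hs i h0 hin hwin).symm
      | exact (mask_elem t s (L * s - n).toNat hs i h0 hin hwin).symm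

-- ===== VERDICT (by name: the statement is the Claim_ definition above) =====
theorem pack_sequences_spec : Claim_equal_pack_sequences := by
  intro t s pd _ hpre
  unfold Spec_pack_sequences
  rcases lt_trichotomy s 0 with hneg | hzero | hpos
  · have hnil := pyRange_neg_nil (t.length : Int) s (by positivity) hneg
    rw [packA_eq_maps]
    unfold pack_sequences_alt
    simp [hnil]
  · exact absurd hzero hpre
  · exact main_pos t s pd hpos
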